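-- pv_equiv track=rewrite | github.com/enjun-trial-goodfire/variant-viewer | display.py | curated_effect_group
-- ===== SOURCE A (Python) =====
-- from collections import OrderedDict as _OrderedDict
--
-- _EFFECT_PREDICTOR_HEADS = frozenset({
--     "alphamissense_c", "bayesdel_c", "cadd_c", "clinpred_c", "deogen2_c",
--     "eve_c", "mcap_c", "metalr_c", "mpc_c", "mutpred_c", "mvp_c",
--     "polyphen_c", "primateai_c", "revel_c", "sift_c", "vest4_c",
--     "gnomad_af_c", "pathogenic",
--     "spliceai_ag_c", "spliceai_al_c", "spliceai_dg_c", "spliceai_dl_c", "spliceai_max_c",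
-- })
--
-- def curated_effect_group(heads: set[str]) -> dict[str, list[str]]:
--     """Group effect heads, excluding clinical predictors (shown in Predictors card).
--
--     Returns ordered dict: {category: [head_keys]}.
--     """
--     _EFFECT_MAP = _OrderedDict({
--         "Substitution": ("aa", "blosum62", "grantham", "hydrophobicity", "volume", "mw"),
--         "Variant Effects": ("splice", "charge", "consequence", "impact", "csq"),
--         "Pfam Domains": ("pfam",),
--     })
--
--     token_to_cat: dict[str, str] = {}
--     for cat, tokens in _EFFECT_MAP.items():
--         for t in tokens:
--             token_to_cat[t] = cat
--
--     groups: dict[str, list[str]] = _OrderedDict((cat, []) for cat in _EFFECT_MAP)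
--
--     for h in sorted(heads):
--         if h in _EFFECT_PREDICTOR_HEADS:
--             continue
--         first_token = h.split("_")[0]
--         cat = token_to_cat.get(first_token)
--         if cat:
--             groups[cat].append(h)
--
--     return _OrderedDict((cat, hs) for cat, hs in groups.items() if hs)
-- ===== SOURCE B (Python) =====
-- from collections import OrderedDict as _OrderedDict
--
-- _EFFECT_PREDICTOR_HEADS = frozenset({
--     "alphamissense_c", "bayesdel_c", "cadd_c", "clinpred_c", "deogen2_c",
--     "eve_c", "mcap_c", "metalr_c", "mpc_c", "mutpred_c", "mvp_c",
--     "polyphen_c", "primateai_c", "revel_c", "sift_c", "vest4_c",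
--     "gnomad_af_c", "pathogenic",
--     "spliceai_ag_c", "spliceai_al_c", "spliceai_dg_c", "spliceai_dl_c", "spliceai_max_c",
-- })
--
-- _EFFECT_MAP_ITEMS = (
--     ("Substitution", ("aa", "blosum62", "grantham", "hydrophobicity", "volume", "mw")),
--     ("Variant Effects", ("splice", "charge", "consequence", "impact", "csq")),
--     ("Pfam Domains", ("pfam",)),
-- )
--
-- def curated_effect_group(heads):
--     """Group effect heads, excluding clinical predictors (shown in Predictors card)."""
--     ss = sorted(heads)
--     out = _OrderedDict()
--     for cat, tokens in _EFFECT_MAP_ITEMS: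
--         hs = [h for h in ss
--               if h not in _EFFECT_PREDICTOR_HEADS and h.split("_")[0] in tokens]
--         if hs:
--             out[cat] = hs
--     return out
-- ===== Notes on version B (the rewrite author's own statement) =====
-- stated objective: simpler
-- what changed: B drops A's token-to-category inverse index and its single dict-accumulating pass over the sorted heads, and instead does one filter scan of the sorted heads per category of _EFFECT_MAP, emitting each non-empty group directly in category order.
import Mathlib
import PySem

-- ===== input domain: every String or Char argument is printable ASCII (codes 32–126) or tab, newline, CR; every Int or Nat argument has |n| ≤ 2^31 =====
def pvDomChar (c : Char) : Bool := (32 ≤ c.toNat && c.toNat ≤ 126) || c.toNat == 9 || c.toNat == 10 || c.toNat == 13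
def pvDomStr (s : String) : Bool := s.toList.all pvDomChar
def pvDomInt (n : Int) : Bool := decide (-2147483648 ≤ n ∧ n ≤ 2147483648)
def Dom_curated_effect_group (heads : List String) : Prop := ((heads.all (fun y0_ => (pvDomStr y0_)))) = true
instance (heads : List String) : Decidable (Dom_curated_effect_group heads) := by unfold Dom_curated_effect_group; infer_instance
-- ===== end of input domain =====

-- B drops A's token→category inverse index and its single index-driven pass over the
-- sorted heads; instead it scans the sorted heads once per category, keeping the heads
-- whose first token belongs to that category (objective: simpler decomposition).

-- ===== PORT A =====
-- _EFFECT_PREDICTOR_HEADS (a frozenset literal; elements distinct, insertion order of the literal)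
def pvPredictorHeads : PySem.Set String := PySem.Set.ofList
  ["alphamissense_c", "bayesdel_c", "cadd_c", "clinpred_c", "deogen2_c",
   "eve_c", "mcap_c", "metalr_c", "mpc_c", "mutpred_c", "mvp_c",
   "polyphen_c", "primateai_c", "revel_c", "sift_c", "vest4_c",
   "gnomad_af_c", "pathogenic",
   "spliceai_ag_c", "spliceai_al_c", "spliceai_dg_c", "spliceai_dl_c", "spliceai_max_c"]

-- _EFFECT_MAP as its ordered items (category, token tuple)
def pvEffectMap : List (String × List String) :=
  [("Substitution", ["aa", "blosum62", "grantham", "hydrophobicity", "volume", "mw"]),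
   ("Variant Effects", ["splice", "charge", "consequence", "impact", "csq"]),
   ("Pfam Domains", ["pfam"])]

-- h.split("_")[0]; "_" ≠ "" so split? is some, and the result is nonempty so index 0 is in range
def pvFirstTok (h : String) : String :=
  PySem.List.pyGetD ((PySem.Str.split? h "_").getD []) 0 ""

-- A's loop body over the sorted heads (one step of 'for h in sorted(heads): …')
def pvStepA (tokenToCat : PySem.Dict String String)
    (g : PySem.Dict String (List String)) (h : String) : PySem.Dict String (List String) :=
  if pvPredictorHeads.contains h then g
  else
    match tokenToCat.get? (pvFirstTok h) with
    | some cat => if cat = "" then g else g.modify cat [] (fun l => l ++ [h])  -- 'if cat:' truthiness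
    | none => g

def curated_effect_group (heads : List String) : List (String × List String) :=
  let tokenToCat : PySem.Dict String String :=
    pvEffectMap.foldl (fun d p => p.2.foldl (fun d t => d.insert t p.1) d) PySem.Dict.empty
  let groups : PySem.Dict String (List String) :=
    PySem.Dict.ofList (pvEffectMap.map (fun p => (p.1, ([] : List String))))
  let groups := (PySem.List.sorted heads (fun x => x) false).foldl (pvStepA tokenToCat) groups
  (groups.items.filter (fun p => !p.2.isEmpty))

-- ===== PORT B =====
def curated_effect_group_alt (heads : List String) : List (String × List String) :=
  let ss := PySem.List.sorted heads (fun x => x) false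
  pvEffectMap.foldl
    (fun out p =>
      let hs := ss.filter (fun h => !pvPredictorHeads.contains h && p.2.contains (pvFirstTok h))
      if hs.isEmpty then out else out ++ [(p.1, hs)])  -- out[cat] = hs: cat is fresh, so it appends
    []

-- ===== PRECONDITION & SPEC =====
def Spec_curated_effect_group (heads : List String) (out : List (String × List String)) : Prop := out = curated_effect_group_alt heads
instance (heads : List String) (out : List (String × List String)) : Decidable (Spec_curated_effect_group heads out) := by unfold Spec_curated_effect_group; infer_instance

-- ===== CLAIM (what is proved, stated in full; the proofs are below) =====
def Claim_equal_curated_effect_group : Prop := ∀ (heads : List String), Dom_curated_effect_group heads → Spec_curated_effect_group heads (curated_effect_group heads)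

-- ===== LEMMAS AND PROOFS =====

-- the inverse index A builds, as a closed literal
def pvTokenToCat : PySem.Dict String String :=
  pvEffectMap.foldl (fun d p => p.2.foldl (fun d t => d.insert t p.1) d) PySem.Dict.empty


set_option maxHeartbeats 1000000 in
lemma pv_tc_some0 (u : String)
    (hu : u ∈ ["aa", "blosum62", "grantham", "hydrophobicity", "volume", "mw"]) :
    pvTokenToCat.get? u = some "Substitution" := by
  fin_cases hu <;> decide

set_option maxHeartbeats 1000000 in
lemma pv_tc_some1 (u : String)
    (hu : u ∈ ["splice", "charge", "consequence", "impact", "csq"]) :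
    pvTokenToCat.get? u = some "Variant Effects" := by
  fin_cases hu <;> decide

set_option maxHeartbeats 1000000 in
lemma pv_tc_some2 (u : String) (hu : u ∈ ["pfam"]) :
    pvTokenToCat.get? u = some "Pfam Domains" := by
  fin_cases hu <;> decide

set_option maxHeartbeats 1600000 in
lemma pv_tc_none (u : String)
    (h0 : u ∉ ["aa", "blosum62", "grantham", "hydrophobicity", "volume", "mw"])
    (h1 : u ∉ ["splice", "charge", "consequence", "impact", "csq"])
    (h2 : u ∉ ["pfam"]) :
    pvTokenToCat.get? u = none := by
  simp only [List.mem_cons, List.not_mem_nil, or_false, not_or] at h0 h1 h2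
  rw [show pvTokenToCat = PySem.Dict.mk
      [("aa", "Substitution"), ("blosum62", "Substitution"), ("grantham", "Substitution"),
       ("hydrophobicity", "Substitution"), ("volume", "Substitution"), ("mw", "Substitution"),
       ("splice", "Variant Effects"), ("charge", "Variant Effects"), ("consequence", "Variant Effects"),
       ("impact", "Variant Effects"), ("csq", "Variant Effects"), ("pfam", "Pfam Domains")] from rfl]
  simp only [PySem.Dict.get?_mk_cons, beq_iff_eq]
  split_ifs <;> simp_all [PySem.Dict.get?]

lemma pv_disj01 (u : String)
    (hu : u ∈ ["aa", "blosum62", "grantham", "hydrophobicity", "volume", "mw"]) :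
    u ∉ ["splice", "charge", "consequence", "impact", "csq"] := by
  fin_cases hu <;> decide

lemma pv_disj02 (u : String)
    (hu : u ∈ ["aa", "blosum62", "grantham", "hydrophobicity", "volume", "mw"]) :
    u ∉ ["pfam"] := by fin_cases hu <;> decide

lemma pv_disj12 (u : String)
    (hu : u ∈ ["splice", "charge", "consequence", "impact", "csq"]) :
    u ∉ ["pfam"] := by fin_cases hu <;> decide

-- the dict after A's loop, with open accumulators
lemma pv_loopA (s : List String) (v0 v1 v2 : List String) :
    s.foldl (pvStepA pvTokenToCat)
      (PySem.Dict.mk [("Substitution", v0), ("Variant Effects", v1), ("Pfam Domains", v2)]) =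
    PySem.Dict.mk
      [("Substitution", v0 ++ s.filter (fun h => !pvPredictorHeads.contains h &&
          ["aa", "blosum62", "grantham", "hydrophobicity", "volume", "mw"].contains (pvFirstTok h))),
       ("Variant Effects", v1 ++ s.filter (fun h => !pvPredictorHeads.contains h &&
          ["splice", "charge", "consequence", "impact", "csq"].contains (pvFirstTok h))),
       ("Pfam Domains", v2 ++ s.filter (fun h => !pvPredictorHeads.contains h &&
          ["pfam"].contains (pvFirstTok h)))] := by
  induction s generalizing v0 v1 v2 with
  | nil => simp
  | cons h t ih =>
    simp only [List.foldl_cons]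
    by_cases hp : h ∈ pvPredictorHeads
    · have hs : pvStepA pvTokenToCat
          (PySem.Dict.mk [("Substitution", v0), ("Variant Effects", v1), ("Pfam Domains", v2)]) h =
          PySem.Dict.mk [("Substitution", v0), ("Variant Effects", v1), ("Pfam Domains", v2)] := by
        simp [pvStepA, hp]
      rw [hs, ih]
      simp [List.filter_cons, hp]
    · by_cases h0 : pvFirstTok h ∈ ["aa", "blosum62", "grantham", "hydrophobicity", "volume", "mw"]
      · have hs : pvStepA pvTokenToCat
            (PySem.Dict.mk [("Substitution", v0), ("Variant Effects", v1), ("Pfam Domains", v2)]) h =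
            PySem.Dict.mk [("Substitution", v0 ++ [h]), ("Variant Effects", v1), ("Pfam Domains", v2)] := by
          simp only [pvStepA]
          rw [pv_tc_some0 _ h0]
          simp [hp, PySem.Dict.modify, PySem.Dict.insert, PySem.Dict.getD,
                PySem.Dict.get?, PySem.Dict.contains]
        rw [hs, ih]
        have hd1 := pv_disj01 _ h0
        have hd2 := pv_disj02 _ h0
        simp only [List.mem_cons, List.not_mem_nil, or_false, not_or] at h0 hd1 hd2
        simp [List.filter_cons, hp]
        tauto
      · by_cases h1 : pvFirstTok h ∈ ["splice", "charge", "consequence", "impact", "csq"]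
        · have hs : pvStepA pvTokenToCat
              (PySem.Dict.mk [("Substitution", v0), ("Variant Effects", v1), ("Pfam Domains", v2)]) h =
              PySem.Dict.mk [("Substitution", v0), ("Variant Effects", v1 ++ [h]), ("Pfam Domains", v2)] := by
            simp only [pvStepA]
            rw [pv_tc_some1 _ h1]
            simp [hp, PySem.Dict.modify, PySem.Dict.insert, PySem.Dict.getD,
                  PySem.Dict.get?, PySem.Dict.contains]
          rw [hs, ih]
          have hd1 := pv_disj12 _ h1
          simp only [List.mem_cons, List.not_mem_nil, or_false, not_or] at h0 h1 hd1
          simp [List.filter_cons, hp]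
          tauto
        · by_cases h2 : pvFirstTok h ∈ ["pfam"]
          · have hs : pvStepA pvTokenToCat
                (PySem.Dict.mk [("Substitution", v0), ("Variant Effects", v1), ("Pfam Domains", v2)]) h =
                PySem.Dict.mk [("Substitution", v0), ("Variant Effects", v1), ("Pfam Domains", v2 ++ [h])] := by
              simp only [pvStepA]
              rw [pv_tc_some2 _ h2]
              simp [hp, PySem.Dict.modify, PySem.Dict.insert, PySem.Dict.getD,
                    PySem.Dict.get?, PySem.Dict.contains]
            rw [hs, ih]
            simp only [List.mem_cons, List.not_mem_nil, or_false, not_or] at h0 h1 h2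
            simp [List.filter_cons, hp]
            tauto
          · have hs : pvStepA pvTokenToCat
                (PySem.Dict.mk [("Substitution", v0), ("Variant Effects", v1), ("Pfam Domains", v2)]) h =
                PySem.Dict.mk [("Substitution", v0), ("Variant Effects", v1), ("Pfam Domains", v2)] := by
              simp only [pvStepA]
              rw [pv_tc_none _ h0 h1 h2]
              simp [hp]
            rw [hs, ih]
            simp only [List.mem_cons, List.not_mem_nil, or_false, not_or] at h0 h1 h2
            simp [List.filter_cons, hp]
            tauto

-- ===== VERDICT (by name: the statement is the Claim_ definition above) =====
theorem curated_effect_group_spec : Claim_equal_curated_effect_group := by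
  intro heads _
  show curated_effect_group heads = curated_effect_group_alt heads
  have hA : curated_effect_group heads =
      (((PySem.List.sorted heads (fun x => x) false).foldl (pvStepA pvTokenToCat)
        (PySem.Dict.mk [("Substitution", []), ("Variant Effects", []), ("Pfam Domains", [])])).items.filter
        (fun p => !p.2.isEmpty)) := rfl
  have hB : curated_effect_group_alt heads =
      pvEffectMap.foldl
        (fun out p =>
          let hs := (PySem.List.sorted heads (fun x => x) false).filter
            (fun h => !pvPredictorHeads.contains h && p.2.contains (pvFirstTok h))
          if hs.isEmpty then out else out ++ [(p.1, hs)]) [] := rfl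
  rw [hA, hB, pv_loopA]
  simp only [pvEffectMap, List.foldl_cons, List.foldl_nil]
  generalize (PySem.List.sorted heads (fun x => x) false).filter (fun h => !pvPredictorHeads.contains h &&
      ["aa", "blosum62", "grantham", "hydrophobicity", "volume", "mw"].contains (pvFirstTok h)) = f0
  generalize (PySem.List.sorted heads (fun x => x) false).filter (fun h => !pvPredictorHeads.contains h &&
      ["splice", "charge", "consequence", "impact", "csq"].contains (pvFirstTok h)) = f1
  generalize (PySem.List.sorted heads (fun x => x) false).filter (fun h => !pvPredictorHeads.contains h &&
      ["pfam"].contains (pvFirstTok h)) = f2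
  by_cases e0 : f0.isEmpty <;> by_cases e1 : f1.isEmpty <;> by_cases e2 : f2.isEmpty <;>
    simp [e0, e1, e2, List.filter_cons, List.isEmpty_iff] <;> simp_all [List.isEmpty_iff]
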